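-- pv_equiv track=rewrite | github.com/oolugboy/CodingChallenges | Codeforces/Problem-D/StringDeletion.py | get_repeat_string_blocks
-- ===== SOURCE A (Python) =====
-- def get_repeat_string_blocks(s):
--     blocks = []
--     prev_item = ''
--     for i in range(0, len(s)):
--         if s[i] != prev_item:
--             blocks.append(1)
--             prev_item = s[i]
--         else:
--             blocks[len(blocks) - 1] += 1
--     return blocks
-- ===== SOURCE B (Python) =====
-- def get_repeat_string_blocks(s):
--     blocks = []
--     i = 0
--     n = len(s)
--     while i < n:
--         j = i + 1
--         while j < n and s[j] == s[i]:
--             j += 1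
--         blocks.append(j - i)
--         i = j
--     return blocks
-- ===== Notes on version B (the rewrite author's own statement) =====
-- stated objective: alternative
-- what changed: B groups the string with a two-pointer scan that emits each run's length at once (j-i), instead of A's single pass that tracks prev_item and increments blocks[-1] in place.
import Mathlib
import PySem

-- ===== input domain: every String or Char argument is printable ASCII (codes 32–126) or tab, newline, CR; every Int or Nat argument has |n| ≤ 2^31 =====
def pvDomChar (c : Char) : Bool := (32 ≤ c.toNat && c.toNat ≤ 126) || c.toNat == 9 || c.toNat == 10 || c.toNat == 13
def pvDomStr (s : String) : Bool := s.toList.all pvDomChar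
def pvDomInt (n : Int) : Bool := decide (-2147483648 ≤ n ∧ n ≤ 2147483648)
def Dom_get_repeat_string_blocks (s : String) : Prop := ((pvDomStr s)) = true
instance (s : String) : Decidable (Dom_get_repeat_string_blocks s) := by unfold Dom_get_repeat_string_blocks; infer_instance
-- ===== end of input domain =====

-- B replaces A's prev_item/blocks[-1]-increment pass by a two-pointer run scan emitting each run length at once (alternative decomposition, same cost).

-- ===== PORT A =====
-- blocks[len(blocks)-1] += 1 : increment the last element in place
def pvIncLast : List Int → List Int
  | [] => []
  | [x] => [x + 1]
  | x :: xs => x :: pvIncLast xs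

-- the for-loop: state is (blocks, prev_item); prev_item = '' modelled as none (never equal to a char)
def pvLoopA (blocks : List Int) (prev : Option Char) : List Char → List Int
  | [] => blocks
  | c :: rest =>
      if some c ≠ prev then pvLoopA (blocks ++ [1]) (some c) rest
      else pvLoopA (pvIncLast blocks) prev rest

def get_repeat_string_blocks (s : String) : List Int := pvLoopA [] none s.toList

-- ===== PORT B =====
-- inner while: j advances over chars equal to s[i] (takeWhile); outer loop resumes at j (dropWhile); appends j-i
def pvLoopB : List Char → List Int
  | c :: rest =>
      ((1 + (rest.takeWhile (· == c)).length : Int)) :: pvLoopB (rest.dropWhile (· == c))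
  | [] => []
termination_by l => l.length
decreasing_by
  simp only [List.length_cons]
  exact Nat.lt_succ_of_le (List.length_dropWhile_le _ _)

def get_repeat_string_blocks_alt (s : String) : List Int := pvLoopB s.toList

-- ===== PRECONDITION & SPEC =====
def Spec_get_repeat_string_blocks (s : String) (out : List Int) : Prop := out = get_repeat_string_blocks_alt s
instance (s : String) (out : List Int) : Decidable (Spec_get_repeat_string_blocks s out) := by unfold Spec_get_repeat_string_blocks; infer_instance

-- ===== CLAIM (what is proved, stated in full; the proofs are below) =====
def Claim_equal_get_repeat_string_blocks : Prop := ∀ (s : String), Dom_get_repeat_string_blocks s → Spec_get_repeat_string_blocks s (get_repeat_string_blocks s)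

-- ===== LEMMAS AND PROOFS =====
theorem pvIncLast_append (blocks : List Int) (k : Int) :
    pvIncLast (blocks ++ [k]) = blocks ++ [k + 1] := by
  induction blocks with
  | nil => simp [pvIncLast]
  | cons x xs ih =>
      cases xs with
      | nil => simp [pvIncLast]
      | cons y ys => simpa [pvIncLast] using ih

theorem pvLoopA_key (l : List Char) : ∀ (c : Char) (k : Int) (blocks : List Int),
    pvLoopA (blocks ++ [k]) (some c) l
      = blocks ++ (k + ((l.takeWhile (· == c)).length : Int)) :: pvLoopB (l.dropWhile (· == c)) := by
  induction l with
  | nil => intro c k blocks; simp [pvLoopA, pvLoopB]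
  | cons d rest ih =>
      intro c k blocks
      by_cases h : d = c
      · subst h
        rw [pvLoopA]
        simp only [ne_eq, not_true_eq_false, if_false]
        rw [pvIncLast_append, ih d (k + 1) blocks,
          List.takeWhile_cons_of_pos (by simp), List.dropWhile_cons_of_pos (by simp)]
        simp only [List.length_cons]
        push_cast
        ring_nf
      · have hne : (some d ≠ some c) := by simp [h]
        rw [pvLoopA, if_pos hne, ih d 1 (blocks ++ [k]),
          List.takeWhile_cons_of_neg (by simp [h]), List.dropWhile_cons_of_neg (by simp [h]),
          pvLoopB]
        simp

-- ===== VERDICT (by name: the statement is the Claim_ definition above) =====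
theorem get_repeat_string_blocks_spec : Claim_equal_get_repeat_string_blocks := by
  intro s _
  unfold Spec_get_repeat_string_blocks get_repeat_string_blocks get_repeat_string_blocks_alt
  cases hl : s.toList with
  | nil => simp [pvLoopA, pvLoopB]
  | cons c rest =>
      have hne : (some c ≠ (none : Option Char)) := by simp
      rw [pvLoopA, if_pos hne]
      have := pvLoopA_key rest c 1 []
      simpa [pvLoopB] using this
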